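-- pv_equiv track=rewrite | github.com/N0len-sasha/algoritms_and_data_structures | summer_school/main.py | check_nickname
-- ===== SOURCE A (Python) =====
-- def check_nickname(nickname):
--     if len(nickname) < 8:
--         return 'NO'
--
--     if not any(char.isdigit() for char in nickname):
--         return 'NO'
--
--     if not any(char.isupper() for char in nickname):
--         return 'NO'
--
--     if not any(char.islower() for char in nickname):
--         return 'NO'
--
--     return 'YES'
-- ===== SOURCE B (Python) =====
-- def check_nickname(nickname):
--     if len(nickname) < 8:
--         return 'NO'
--     has_digit = has_upper = has_lower = False
--     for char in nickname:
--         has_digit = has_digit or char.isdigit()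
--         has_upper = has_upper or char.isupper()
--         has_lower = has_lower or char.islower()
--     return 'YES' if has_digit and has_upper and has_lower else 'NO'
-- ===== Notes on version B (the rewrite author's own statement) =====
-- stated objective: simpler
-- what changed: Replaces the three separate short-circuiting any() scans with one single pass that maintains three boolean flags and decides at the end.
import Mathlib
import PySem

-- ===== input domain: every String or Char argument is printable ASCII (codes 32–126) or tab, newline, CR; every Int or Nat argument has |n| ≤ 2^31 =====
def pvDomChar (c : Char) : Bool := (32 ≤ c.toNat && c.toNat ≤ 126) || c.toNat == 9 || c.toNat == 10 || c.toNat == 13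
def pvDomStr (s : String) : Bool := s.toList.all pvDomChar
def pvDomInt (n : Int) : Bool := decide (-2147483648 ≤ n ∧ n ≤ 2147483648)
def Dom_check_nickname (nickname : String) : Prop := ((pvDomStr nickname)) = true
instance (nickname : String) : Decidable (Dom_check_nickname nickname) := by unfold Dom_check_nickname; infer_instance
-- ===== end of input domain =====

-- B folds the string once with three boolean flags instead of A's three separate any() scans (objective: simpler).


-- ===== PORT A =====
def check_nickname (nickname : String) : String :=
  if PySem.Str.len nickname < 8 then "NO"
  else if ¬ (nickname.toList.any (fun c => PySem.Chars.isdigit c)) then "NO"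
  else if ¬ (nickname.toList.any (fun c => PySem.Chars.isupper c)) then "NO"
  else if ¬ (nickname.toList.any (fun c => PySem.Chars.islower c)) then "NO"
  else "YES"

-- ===== PORT B =====
def check_nickname_alt (nickname : String) : String :=
  if PySem.Str.len nickname < 8 then "NO"
  else
    let flags := nickname.toList.foldl
      (fun (st : Bool × Bool × Bool) c =>
        (st.1 || PySem.Chars.isdigit c,
         st.2.1 || PySem.Chars.isupper c,
         st.2.2 || PySem.Chars.islower c))
      (false, false, false)
    if flags.1 && flags.2.1 && flags.2.2 then "YES" else "NO"

-- ===== PRECONDITION & SPEC =====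
def Spec_check_nickname (nickname : String) (out : String) : Prop := out = check_nickname_alt nickname
instance (nickname : String) (out : String) : Decidable (Spec_check_nickname nickname out) := by unfold Spec_check_nickname; infer_instance

-- ===== CLAIM (what is proved, stated in full; the proofs are below) =====
def Claim_equal_check_nickname : Prop := ∀ (nickname : String), Dom_check_nickname nickname → Spec_check_nickname nickname (check_nickname nickname)

-- ===== LEMMAS AND PROOFS =====

theorem flags_foldl (cs : List Char) (d u l : Bool) :
    cs.foldl
      (fun (st : Bool × Bool × Bool) c =>
        (st.1 || PySem.Chars.isdigit c,
         st.2.1 || PySem.Chars.isupper c,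
         st.2.2 || PySem.Chars.islower c))
      (d, u, l)
    = (d || cs.any (fun c => PySem.Chars.isdigit c),
       u || cs.any (fun c => PySem.Chars.isupper c),
       l || cs.any (fun c => PySem.Chars.islower c)) := by
  induction cs generalizing d u l with
  | nil => simp
  | cons c cs ih => simp [List.foldl, ih, Bool.or_assoc]

-- ===== VERDICT (by name: the statement is the Claim_ definition above) =====
theorem check_nickname_spec : Claim_equal_check_nickname := by
  intro s _
  unfold Spec_check_nickname check_nickname check_nickname_alt
  by_cases h : PySem.Str.len s < 8
  · rw [if_pos h, if_pos h]
  · rw [if_neg h, if_neg h]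
    simp only [flags_foldl, Bool.false_or]
    by_cases hd : s.toList.any (fun c => PySem.Chars.isdigit c) <;>
    by_cases hu : s.toList.any (fun c => PySem.Chars.isupper c) <;>
    by_cases hl : s.toList.any (fun c => PySem.Chars.islower c) <;>
      simp [hd, hu, hl]
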